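-- pv_equiv track=rewrite | github.com/Aerysaint/Paddy | src/detect.py | _looks_like_appendix_or_section_title
-- ===== SOURCE A (Python) =====
-- def _looks_like_appendix_or_section_title(text: str) -> bool:
--     """
--     Check if text looks like an appendix or section title.
--
--     Args:
--         text: Text to check
--
--     Returns:
--         True if it looks like an appendix or section title
--     """
--     text_lower = text.lower().strip()
--
--     # Appendix patterns
--     if text_lower.startswith('appendix'):
--         return True
--
--     # Section patterns
--     section_patterns = [
--         'summary', 'background', 'approach', 'requirements',
--         'evaluation', 'milestones', 'timeline', 'funding',
--         'membership', 'term', 'chair', 'meetings'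
--     ]
--
--     for pattern in section_patterns:
--         if text_lower == pattern or text_lower.startswith(pattern + ' '):
--             return True
--
--     return False
-- ===== SOURCE B (Python) =====
-- _SECTION_WORDS = [
--     'summary', 'background', 'approach', 'requirements',
--     'evaluation', 'milestones', 'timeline', 'funding',
--     'membership', 'term', 'chair', 'meetings',
-- ]
--
--
-- def _build_trie():
--     # prefix tree: children keyed by char; the key '' marks an accepting node
--     root = {}
--     for word in _SECTION_WORDS:
--         node = root
--         for ch in word:
--             node = node.setdefault(ch, {})
--         node[''] = True
--     return root
--
--
-- _TRIE = _build_trie()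
--
--
-- def _looks_like_appendix_or_section_title(text: str) -> bool:
--     t = text.lower().strip()
--     if t.startswith('appendix'):
--         return True
--     node = _TRIE
--     for ch in t:
--         if '' in node and ch == ' ':
--             return True
--         if ch not in node:
--             return False
--         node = node[ch]
--     return '' in node
-- ===== Notes on version B (the rewrite author's own statement) =====
-- stated objective: alternative
-- what changed: B builds a prefix tree (trie) once from the section words and decides by a single walk of the lowered/stripped text with accept-at-word-boundary nodes, replacing A's loop that tests each pattern for equality or for being a space-terminated prefix; the appendix prefix guard is kept unchanged.
import Mathlib
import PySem

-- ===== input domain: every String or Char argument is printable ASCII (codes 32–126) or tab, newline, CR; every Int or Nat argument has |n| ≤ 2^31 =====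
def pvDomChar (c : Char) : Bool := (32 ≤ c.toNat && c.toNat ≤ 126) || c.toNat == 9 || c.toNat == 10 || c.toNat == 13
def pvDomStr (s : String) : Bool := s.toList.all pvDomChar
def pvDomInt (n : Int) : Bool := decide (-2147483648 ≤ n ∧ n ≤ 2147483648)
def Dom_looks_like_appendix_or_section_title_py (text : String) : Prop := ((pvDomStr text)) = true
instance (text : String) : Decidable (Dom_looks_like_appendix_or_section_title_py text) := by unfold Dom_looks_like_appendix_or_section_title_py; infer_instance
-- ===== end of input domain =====

-- B replaces A's per-pattern equality-or-prefix loop with a prefix tree (trie) built once from the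
-- section words and walked once over the text, accepting at a word boundary (alternative; same cost).

-- ===== PORT A =====
def pvPatterns : List (List Char) :=
  ["summary".toList, "background".toList, "approach".toList, "requirements".toList,
   "evaluation".toList, "milestones".toList, "timeline".toList, "funding".toList,
   "membership".toList, "term".toList, "chair".toList, "meetings".toList]

-- A: lower+strip, 'appendix' prefix guard, then the for-loop with early return (= List.any)
def looks_like_appendix_or_section_title_py (text : String) : Bool :=
  let textLower := PySem.Chars.strip (PySem.Chars.lower text.toList)
  if PySem.Chars.startswith textLower "appendix".toList then true
  else
    pvPatterns.any (fun p =>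
      decide (textLower = p) || PySem.Chars.startswith textLower (p ++ [' ']))

-- ===== PORT B =====
-- Source B's trie is a dict of children per char plus an '' accept marker; ported as an inductive tree
-- with a total child function (absent dict key = leaf) and the accept marker as a Bool field.
inductive PvTrie where
  | leaf : PvTrie
  | node : Bool → (Char → PvTrie) → PvTrie

-- Source B's inner insertion loop (node.setdefault per char, then set the accept marker)
def pvInsert : PvTrie → List Char → PvTrie
  | .leaf, [] => .node true (fun _ => .leaf)
  | .leaf, c :: w => .node false (fun d => if d = c then pvInsert .leaf w else .leaf)
  | .node _ ch, [] => .node true ch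
  | .node a ch, c :: w => .node a (fun d => if d = c then pvInsert (ch c) w else ch d)

-- Source B's _build_trie: fold the insertion over the word list, starting from the empty root dict
def pvTrie : PvTrie := pvPatterns.foldl pvInsert (.node false (fun _ => .leaf))

-- Source B's walk loop: accept mid-text at a space after a stored word, descend per char, accept at end
def pvWalk : PvTrie → List Char → Bool
  | .leaf, _ => false
  | .node a _, [] => a
  | .node a ch, c :: s => (a && decide (c = ' ')) || pvWalk (ch c) s

def looks_like_appendix_or_section_title_py_alt (text : String) : Bool :=
  let t := PySem.Chars.strip (PySem.Chars.lower text.toList)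
  if PySem.Chars.startswith t "appendix".toList then true
  else pvWalk pvTrie t

-- ===== PRECONDITION & SPEC =====
def Spec_looks_like_appendix_or_section_title_py (text : String) (out : Bool) : Prop := out = looks_like_appendix_or_section_title_py_alt text
instance (text : String) (out : Bool) : Decidable (Spec_looks_like_appendix_or_section_title_py text out) := by unfold Spec_looks_like_appendix_or_section_title_py; infer_instance

-- ===== CLAIM (what is proved, stated in full; the proofs are below) =====
def Claim_equal_looks_like_appendix_or_section_title_py : Prop := ∀ (text : String), Dom_looks_like_appendix_or_section_title_py text → Spec_looks_like_appendix_or_section_title_py text (looks_like_appendix_or_section_title_py text)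

-- ===== LEMMAS AND PROOFS =====

-- A's per-pattern test, as a named predicate
def pvTest (w s : List Char) : Bool :=
  decide (s = w) || PySem.Chars.startswith s (w ++ [' '])

theorem pvSW_nil (s : List Char) : PySem.Chars.startswith s [] = true := by
  rw [PySem.Chars.startswith_iff]; exact List.nil_prefix

theorem pvSW_cons_nil (c : Char) (p : List Char) :
    PySem.Chars.startswith [] (c :: p) = false := by
  rw [Bool.eq_false_iff, ne_eq, PySem.Chars.startswith_iff]; simp

theorem pvSW_cons_cons (d c : Char) (s p : List Char) :
    PySem.Chars.startswith (d :: s) (c :: p) = (decide (c = d) && PySem.Chars.startswith s p) := by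
  rw [Bool.eq_iff_iff]
  simp [PySem.Chars.startswith_iff, List.cons_prefix_cons]

-- trie correctness of one insertion: walking after inserting w adds exactly A's test for w
theorem pvWalk_insert (w : List Char) : ∀ (tr : PvTrie) (s : List Char),
    pvWalk (pvInsert tr w) s = (pvWalk tr s || pvTest w s) := by
  induction w with
  | nil =>
    intro tr s
    cases tr with
    | leaf =>
      cases s with
      | nil => simp [pvInsert, pvWalk, pvTest]
      | cons c s' =>
        by_cases hc : c = ' ' <;>
          simp [pvInsert, pvWalk, pvTest, pvSW_cons_cons, pvSW_nil, hc, eq_comm]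
    | node a ch =>
      cases s with
      | nil => simp [pvInsert, pvWalk, pvTest]
      | cons c s' =>
        by_cases hc : c = ' ' <;>
          simp [pvInsert, pvWalk, pvTest, pvSW_cons_cons, pvSW_nil, hc, eq_comm]
  | cons c w ih =>
    intro tr s
    cases tr with
    | leaf =>
      cases s with
      | nil => simp [pvInsert, pvWalk, pvTest, pvSW_cons_nil]
      | cons d s' =>
        by_cases h : d = c
        · subst h
          simp [pvInsert, pvWalk, pvTest, pvSW_cons_cons, ih]
        · simp [pvInsert, pvWalk, pvTest, pvSW_cons_cons, h, Ne.symm h]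
    | node a ch =>
      cases s with
      | nil => simp [pvInsert, pvWalk, pvTest, pvSW_cons_nil]
      | cons d s' =>
        by_cases h : d = c
        · subst h
          simp [pvInsert, pvWalk, pvTest, pvSW_cons_cons, ih, Bool.or_assoc]
        · simp [pvInsert, pvWalk, pvTest, pvSW_cons_cons, h, Ne.symm h]

-- folding insertions over a word list: the walk decides A's any-loop over that list
theorem pvWalk_foldl (ws : List (List Char)) : ∀ (r : PvTrie) (s : List Char),
    pvWalk (ws.foldl pvInsert r) s = (pvWalk r s || ws.any (fun w => pvTest w s)) := by
  induction ws with
  | nil => intro r s; simp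
  | cons w ws ih =>
    intro r s
    simp [List.foldl_cons, ih, pvWalk_insert, Bool.or_assoc]

theorem pvWalk_empty (s : List Char) : pvWalk (.node false (fun _ => .leaf)) s = false := by
  cases s <;> simp [pvWalk]

theorem pvWalk_trie (s : List Char) :
    pvWalk pvTrie s = pvPatterns.any (fun w => pvTest w s) := by
  rw [pvTrie, pvWalk_foldl, pvWalk_empty, Bool.false_or]

-- ===== VERDICT (by name: the statement is the Claim_ definition above) =====
theorem looks_like_appendix_or_section_title_py_spec : Claim_equal_looks_like_appendix_or_section_title_py := by
  intro text _
  unfold Spec_looks_like_appendix_or_section_title_py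
  unfold looks_like_appendix_or_section_title_py looks_like_appendix_or_section_title_py_alt
  simp only []
  split
  · rfl
  · rw [pvWalk_trie]
    simp [pvTest]
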